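-- pv_equiv track=rewrite | github.com/phamngocson1408/deflate_sw | 1_dict_trainer_wo_zstd.py | length_to_deflate_code
-- ===== SOURCE A (Python) =====
-- def length_to_deflate_code(L: int) -> int:
--     """
--     Map a match length (3..258) to DEFLATE length code (257..285).
--     """
--     if L < 3:
--         raise ValueError("DEFLATE length must be >= 3")
--     if L <= 10:
--         return 257 + (L - 3)
--     table = [
--         (265, 11, 1, 2), (266, 13, 1, 2), (267, 15, 1, 2), (268, 17, 1, 2),
--         (269, 19, 2, 4), (270, 23, 2, 4), (271, 27, 2, 4), (272, 31, 2, 4),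
--         (273, 35, 3, 8), (274, 43, 3, 8), (275, 51, 3, 8), (276, 59, 3, 8),
--         (277, 67, 4, 16), (278, 83, 4, 16), (279, 99, 4, 16), (280, 115, 4, 16),
--         (281, 131, 5, 32), (282, 163, 5, 32), (283, 195, 5, 32), (284, 227, 5, 31),
--     ]
--     for code, base, bits, span in table:
--         if L >= base and L <= base + span - 1:
--             return code
--     if L == 258:
--         return 285
--     raise ValueError(f"Unsupported length for DEFLATE: {L}")
-- ===== SOURCE B (Python) =====
-- def length_to_deflate_code(L: int) -> int:
--     """
--     Map a match length (3..258) to DEFLATE length code (257..285).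
--     """
--     if L < 3:
--         raise ValueError("DEFLATE length must be >= 3")
--     if L <= 10:
--         return 257 + (L - 3)
--     if L == 258:
--         return 285
--     if L > 258:
--         raise ValueError(f"Unsupported length for DEFLATE: {L}")
--     # 11 <= L <= 257: closed form from the extra-bits structure of DEFLATE
--     t = L - 3
--     b = t.bit_length() - 3          # extra-bits block index (1..5)
--     return 261 + 4 * b + ((t - (1 << (b + 2))) >> b)
-- ===== Notes on version B (the rewrite author's own statement) =====
-- stated objective: alternative
-- what changed: Replaces the 20-entry table scan for lengths 11..257 with a closed-form arithmetic derivation from the extra-bits block structure (bit_length and shifts); the trivial guards and both ValueError branches are kept.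
import Mathlib
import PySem

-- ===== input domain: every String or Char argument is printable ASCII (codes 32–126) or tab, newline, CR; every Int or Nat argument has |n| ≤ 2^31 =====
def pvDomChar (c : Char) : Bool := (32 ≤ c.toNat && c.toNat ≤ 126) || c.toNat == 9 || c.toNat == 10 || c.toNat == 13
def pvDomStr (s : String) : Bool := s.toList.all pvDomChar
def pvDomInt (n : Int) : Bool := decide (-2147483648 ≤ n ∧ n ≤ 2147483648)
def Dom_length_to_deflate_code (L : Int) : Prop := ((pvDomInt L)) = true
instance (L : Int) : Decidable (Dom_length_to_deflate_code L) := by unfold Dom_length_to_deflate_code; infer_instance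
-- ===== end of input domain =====

-- B replaces A's 20-entry table scan by a closed-form bit-arithmetic formula for 11 ≤ L ≤ 257;
-- both raise ValueError for L < 3 and L > 258 (excluded by Pre_), return value equivalence only.

-- ===== PORT A =====
def pvTable : List (Int × Int × Int × Int) :=
  [(265, 11, 1, 2), (266, 13, 1, 2), (267, 15, 1, 2), (268, 17, 1, 2),
   (269, 19, 2, 4), (270, 23, 2, 4), (271, 27, 2, 4), (272, 31, 2, 4),
   (273, 35, 3, 8), (274, 43, 3, 8), (275, 51, 3, 8), (276, 59, 3, 8),
   (277, 67, 4, 16), (278, 83, 4, 16), (279, 99, 4, 16), (280, 115, 4, 16),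
   (281, 131, 5, 32), (282, 163, 5, 32), (283, 195, 5, 32), (284, 227, 5, 31)]

-- the 'for' loop: first matching table row, if any
def pvScan (L : Int) : List (Int × Int × Int × Int) → Option Int
  | [] => none
  | (code, base, _, span) :: rest =>
      if L ≥ base ∧ L ≤ base + span - 1 then some code else pvScan L rest

def length_to_deflate_code (L : Int) : Int :=
  if L < 3 then 0  -- Python raises ValueError here (outside Pre_)
  else if L ≤ 10 then 257 + (L - 3)
  else
    match pvScan L pvTable with
    | some code => code
    | none => if L = 258 then 285 else 0  -- second raise (outside Pre_)

-- ===== PORT B =====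
-- t.bit_length() for t ≥ 0, structural recursion on a fuel bound (fuel ≥ t suffices)
def pvBitLenAux : Nat → Nat → Nat
  | 0, _ => 0
  | fuel + 1, n => if n = 0 then 0 else pvBitLenAux fuel (n / 2) + 1
def pvBitLen (n : Nat) : Nat := pvBitLenAux n n

def length_to_deflate_code_alt (L : Int) : Int :=
  if L < 3 then 0  -- raise (outside Pre_)
  else if L ≤ 10 then 257 + (L - 3)
  else if L = 258 then 285
  else if L > 258 then 0  -- raise (outside Pre_)
  else
    -- 11 ≤ L ≤ 257, all quantities nonnegative: computed in Nat
    let t : Nat := (L - 3).toNat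
    let b : Nat := pvBitLen t - 3  -- t.bit_length() - 3
    ((261 + 4 * b + ((t - 2 ^ (b + 2)) >>> b) : Nat) : Int)

-- ===== PRECONDITION & SPEC =====
-- Pre_ excludes exactly the inputs where A raises ValueError: L < 3 or L > 258.
def Pre_length_to_deflate_code (L : Int) : Prop := 3 ≤ L ∧ L ≤ 258
instance (L : Int) : Decidable (Pre_length_to_deflate_code L) := by unfold Pre_length_to_deflate_code; infer_instance
def pvWitness_length_to_deflate_code : Int := (42)
def Spec_length_to_deflate_code (L : Int) (out : Int) : Prop := out = length_to_deflate_code_alt L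
instance (L : Int) (out : Int) : Decidable (Spec_length_to_deflate_code L out) := by unfold Spec_length_to_deflate_code; infer_instance

-- ===== CLAIM (what is proved, stated in full; the proofs are below) =====
def Claim_equal_length_to_deflate_code : Prop := ∀ (L : Int), Dom_length_to_deflate_code L → Pre_length_to_deflate_code L → Spec_length_to_deflate_code L (length_to_deflate_code L)

-- ===== LEMMAS AND PROOFS =====
-- both ports agree on every admissible length, checked pointwise over 3..258
set_option maxRecDepth 4000 in
theorem pv_all_eq : ((List.range 256).all (fun n =>
    length_to_deflate_code (3 + (n : Int)) == length_to_deflate_code_alt (3 + (n : Int)))) = true := by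
  decide

-- ===== VERDICT (by name: the statement is the Claim_ definition above) =====
theorem length_to_deflate_code_spec : Claim_equal_length_to_deflate_code := by
  intro L _ hpre
  unfold Spec_length_to_deflate_code
  obtain ⟨h3, h258⟩ := hpre
  have hn : L = 3 + ((L - 3).toNat : Int) := by omega
  have hlt : (L - 3).toNat < 256 := by omega
  have := List.all_eq_true.mp pv_all_eq ((L - 3).toNat) (List.mem_range.mpr hlt)
  rw [hn]
  exact (beq_iff_eq.mp this)
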